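-- pv_equiv track=rewrite | github.com/SwenBrands/pySeasonal | pyseasonal/utils/functions_seasonal.py | assign_season_label
-- ===== SOURCE A (Python) =====
-- def assign_season_label(season_list_f: list) -> str:
--     '''Assign season label string for an input list of consecutive months.
--
--     Generates abbreviated season labels from month numbers. Handles single months
--     (returns full month name like 'JAN') and multi-month seasons (returns initials
--     like 'DJF' for December-January-February). Supports year wrap-around for seasons
--     crossing December to January.
--
--     Input:
--         season_list_f: list of integers (1-12) representing consecutive months
--                       Must contain 1-5 months in sequential order
--                       Example: [12,1,2] for December-January-February
--
--     Output:
--         String label for the season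
--         Single month: full name (e.g., 'JAN', 'FEB', 'DEC')
--         Multi-month: initials concatenated (e.g., 'DJF', 'JJA', 'MAMJ')
--
--     Raises:
--         ValueError: if months are not consecutive or list length is invalid
--     '''
--     months = ['JAN', 'FEB', 'MAR', 'APR', 'MAY', 'JUN', 'JUL', 'AUG', 'SEP', 'OCT', 'NOV', 'DEC']
--     months_initials = ['J', 'F', 'M', 'A', 'M', 'J', 'J', 'A', 'S', 'O', 'N', 'D']
--
--     # Check months validity
--     if any(m not in range(1, 13) for m in season_list_f):
--         raise ValueError(
--             'ERROR: all month values in <season_list_f> must be integers between 1 and 12 !'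
--         )
--
--     # Check list length
--     if not (1 <= len(season_list_f) <= 5):
--         raise ValueError(
--             'ERROR: <season_list_f> must contain between 1 and 5 months only !'
--         )
--
--     if len(season_list_f) == 1:
--         return months[season_list_f[0]-1]
--
--     for i, m in enumerate(season_list_f[:-1]):
--         if m == 12 and season_list_f[i+1] != 1:
--             raise ValueError('ERROR: the months in <season_list_f> are not consecutive !')
--         if m != 12 and season_list_f[i+1] - m != 1:
--             raise ValueError('ERROR: the months in <season_list_f> are not consecutive !')
--
--     return ''.join([months_initials[m-1] for m in season_list_f])
-- ===== SOURCE B (Python) =====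
-- def assign_season_label(season_list_f: list) -> str:
--     '''Season label from consecutive month list: closed-form expected sequence
--     and a slice of a doubled initials string instead of a pairwise loop.'''
--     months = ['JAN', 'FEB', 'MAR', 'APR', 'MAY', 'JUN', 'JUL', 'AUG', 'SEP', 'OCT', 'NOV', 'DEC']
--
--     if any(m < 1 or m > 12 for m in season_list_f):
--         raise ValueError(
--             'ERROR: all month values in <season_list_f> must be integers between 1 and 12 !'
--         )
--
--     n = len(season_list_f)
--     if not (1 <= n <= 5):
--         raise ValueError(
--             'ERROR: <season_list_f> must contain between 1 and 5 months only !'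
--         )
--
--     first = season_list_f[0]
--     if n == 1:
--         return months[first - 1]
--
--     expected = [((first - 1 + k) % 12) + 1 for k in range(n)]
--     if season_list_f != expected:
--         raise ValueError('ERROR: the months in <season_list_f> are not consecutive !')
--
--     doubled = 'JFMAMJJASOND' * 2
--     return doubled[first - 1:first - 1 + n]
-- ===== Notes on version B (the rewrite author's own statement) =====
-- stated objective: alternative
-- what changed: Replaces the pairwise adjacency loop and the per-month join by a closed-form check (the list must equal the modular sequence generated from its first month) and takes the label as one slice of a doubled initials string.
import Mathlib
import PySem

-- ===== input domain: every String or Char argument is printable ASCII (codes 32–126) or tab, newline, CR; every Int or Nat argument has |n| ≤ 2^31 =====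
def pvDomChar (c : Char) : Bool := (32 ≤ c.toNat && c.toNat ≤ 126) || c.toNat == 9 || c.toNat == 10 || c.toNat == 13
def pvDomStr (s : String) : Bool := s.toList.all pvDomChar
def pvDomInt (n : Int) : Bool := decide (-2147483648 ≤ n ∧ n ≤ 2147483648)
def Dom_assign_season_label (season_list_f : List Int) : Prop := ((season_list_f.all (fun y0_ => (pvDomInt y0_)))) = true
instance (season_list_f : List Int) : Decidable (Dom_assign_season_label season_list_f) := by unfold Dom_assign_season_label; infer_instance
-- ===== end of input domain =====

-- B replaces A's pairwise adjacency loop and per-month join by a closed-form expected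
-- sequence from the first month and one slice of a doubled initials string (objective: alternative).

-- ===== PORT A =====
-- A's pairwise consecutive-months loop (for i, m in enumerate(season_list_f[:-1]): …);
-- `false` marks the ValueError raise, excluded by Pre_.
def pvCheckConsecA : List Int → Bool
  | a :: b :: rest =>
    if a = 12 && b ≠ 1 then false
    else if a ≠ 12 && b - a ≠ 1 then false
    else pvCheckConsecA (b :: rest)
  | _ => true

-- Literal port of A; on the ValueError paths (inputs excluded by Pre_) it returns "".
def assign_season_label (season_list_f : List Int) : String :=
  let months : List String := ["JAN","FEB","MAR","APR","MAY","JUN","JUL","AUG","SEP","OCT","NOV","DEC"]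
  let months_initials : List String := ["J","F","M","A","M","J","J","A","S","O","N","D"]
  if season_list_f.any (fun m => decide (m < 1) || decide (12 < m)) then ""  -- raise ValueError
  else if ¬ (1 ≤ season_list_f.length ∧ season_list_f.length ≤ 5) then ""   -- raise ValueError
  else if season_list_f.length = 1 then
    (PySem.List.pyGet? months ((PySem.List.pyGet? season_list_f 0).getD 0 - 1)).getD ""
  else if ¬ pvCheckConsecA season_list_f then ""                            -- raise ValueError
  else String.join (season_list_f.map (fun m => (PySem.List.pyGet? months_initials (m - 1)).getD ""))

-- ===== PORT B =====
-- Literal port of B (Source B); "" stands for each ValueError raise (excluded by Pre_).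
def assign_season_label_alt (season_list_f : List Int) : String :=
  let months : List String := ["JAN","FEB","MAR","APR","MAY","JUN","JUL","AUG","SEP","OCT","NOV","DEC"]
  if season_list_f.any (fun m => decide (m < 1) || decide (12 < m)) then ""  -- raise ValueError
  else
    let n : Nat := season_list_f.length
    if ¬ (1 ≤ n ∧ n ≤ 5) then ""                                            -- raise ValueError
    else
      let first : Int := (PySem.List.pyGet? season_list_f 0).getD 0
      if n = 1 then (PySem.List.pyGet? months (first - 1)).getD ""
      else
        let expected : List Int := (List.range n).map (fun k => (first - 1 + (k : Int)) % 12 + 1)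
        if season_list_f ≠ expected then ""                                 -- raise ValueError
        else
          let doubled : List Char := "JFMAMJJASONDJFMAMJJASOND".toList
          String.ofList (PySem.List.slice doubled (some (first - 1)) (some (first - 1 + (n : Int))))

-- ===== PRECONDITION & SPEC =====
-- Pre_ admits exactly the inputs on which Python A returns (it raises ValueError otherwise):
-- all months in 1..12, length 1..5, and each month followed by its successor with December→January wrap.
def Pre_assign_season_label (season_list_f : List Int) : Prop :=
  (∀ m ∈ season_list_f, 1 ≤ m ∧ m ≤ 12) ∧
  1 ≤ season_list_f.length ∧ season_list_f.length ≤ 5 ∧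
  season_list_f.IsChain (fun x y => y = x % 12 + 1)
instance (season_list_f : List Int) : Decidable (Pre_assign_season_label season_list_f) := by
  unfold Pre_assign_season_label; infer_instance

def pvWitness_assign_season_label : List Int := [12, 1, 2]

def Spec_assign_season_label (season_list_f : List Int) (out : String) : Prop := out = assign_season_label_alt season_list_f
instance (season_list_f : List Int) (out : String) : Decidable (Spec_assign_season_label season_list_f out) := by unfold Spec_assign_season_label; infer_instance

-- ===== CLAIM (what is proved, stated in full; the proofs are below) =====
def Claim_equal_assign_season_label : Prop := ∀ (season_list_f : List Int), Dom_assign_season_label season_list_f → Pre_assign_season_label season_list_f → Spec_assign_season_label season_list_f (assign_season_label season_list_f)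

-- ===== LEMMAS AND PROOFS =====

-- ===== VERDICT (by name: the statement is the Claim_ definition above) =====
theorem assign_season_label_spec : Claim_equal_assign_season_label := by
  intro l _ hpre
  obtain ⟨hmem, hlen1, hlen5, hchain⟩ := hpre
  unfold Spec_assign_season_label
  match l, hlen1, hlen5 with
  | [a], _, _ =>
    obtain ⟨ha1, ha2⟩ := hmem a (by simp)
    interval_cases a <;> decide
  | [a, b], _, _ =>
    obtain ⟨ha1, ha2⟩ := hmem a (by simp)
    simp only [List.isChain_cons_cons, List.isChain_singleton, and_true] at hchain
    subst hchain
    interval_cases a <;> decide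
  | [a, b, c], _, _ =>
    obtain ⟨ha1, ha2⟩ := hmem a (by simp)
    simp only [List.isChain_cons_cons, List.isChain_singleton, and_true] at hchain
    obtain ⟨hb, hc⟩ := hchain
    subst hb; subst hc
    interval_cases a <;> decide
  | [a, b, c, d], _, _ =>
    obtain ⟨ha1, ha2⟩ := hmem a (by simp)
    simp only [List.isChain_cons_cons, List.isChain_singleton, and_true] at hchain
    obtain ⟨hb, hc, hd⟩ := hchain
    subst hb; subst hc; subst hd
    interval_cases a <;> decide
  | [a, b, c, d, e], _, _ =>
    obtain ⟨ha1, ha2⟩ := hmem a (by simp)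
    simp only [List.isChain_cons_cons, List.isChain_singleton, and_true] at hchain
    obtain ⟨hb, hc, hd, he⟩ := hchain
    subst hb; subst hc; subst hd; subst he
    interval_cases a <;> decide
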